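-- pv_equiv track=rewrite | github.com/PigInTheSky1234/SAT-based-Automated-Search-for-Differential-linear-Distinguishers-via-Truncated-Differential-Trails | VerifyTDProb.py | genTD
-- ===== SOURCE A (Python) =====
-- def genTD(X,n):
--     TD=[]
--     TempX = X
--     MaskX=0
--     IndexX=[]
--
--
--     for i in range(n):
--         TD.append(TempX%3)
--         MaskX=MaskX<<1
--         if (TempX%3)<2:
--             MaskX|=TempX%3
--         else:
--             IndexX.append(n-1-i)
--
--         TempX=TempX//3
--     return TD,MaskX,IndexX
-- ===== SOURCE B (Python) =====
-- def genTD(X, n):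
--     # table-first: the significant trits by the positional closed form, then constant padding
--     # (for 3**i > |X| the floored quotient X // 3**i is 0 or -1, so the trit is 0 or 2)
--     k, p = 0, 1
--     while p <= abs(X):
--         p *= 3
--         k += 1
--     TD = [(X // 3**i) % 3 for i in range(min(k, n))]
--     TD += [0 if X >= 0 else 2] * (n - len(TD))
--     IndexX = [n - 1 - i for i, t in enumerate(TD) if t == 2]
--     MaskX = 0
--     for t in TD:
--         MaskX = (MaskX << 1) | (t if t < 2 else 0)
--     return TD, MaskX, IndexX
-- ===== Notes on version B (the rewrite author's own statement) =====
-- stated objective: alternative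
-- what changed: Replaces A's single fused loop carrying a running quotient TempX and three accumulators by a table-first decomposition: the significant trits are computed independently with the closed form (X // 3**i) % 3 (padding with the constant trit once 3**i exceeds |X|), and the index list and the mask are then derived from that trit table in two separate passes.
import Mathlib
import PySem

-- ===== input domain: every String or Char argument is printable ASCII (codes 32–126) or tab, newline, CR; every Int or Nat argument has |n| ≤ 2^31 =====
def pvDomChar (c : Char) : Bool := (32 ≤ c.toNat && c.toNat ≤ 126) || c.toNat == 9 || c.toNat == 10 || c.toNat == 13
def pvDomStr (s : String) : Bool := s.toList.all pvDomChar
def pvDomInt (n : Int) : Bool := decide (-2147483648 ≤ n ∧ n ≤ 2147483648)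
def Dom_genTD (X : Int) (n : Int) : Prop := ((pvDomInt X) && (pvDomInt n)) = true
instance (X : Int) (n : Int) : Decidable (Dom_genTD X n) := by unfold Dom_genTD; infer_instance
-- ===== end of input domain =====

-- B recomputes each trit by the positional closed form (X // 3**i) % 3 into a table first,
-- then derives the index list and the mask from the table in separate passes (alternative decomposition).

-- ===== PORT A =====
-- one fused loop carrying (TD, MaskX, IndexX, TempX); '<<1' ported as '<<< (1:Nat)', '|' as PySem.Int.bor (both Python-exact)
def genTD_step (n : Int) (st : List Int × Int × List Int × Int) (i : Int) :
    List Int × Int × List Int × Int :=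
  let (TD, MaskX, IndexX, TempX) := st
  let TD := TD ++ [PySem.Int.mod TempX 3]
  let MaskX := MaskX <<< (1 : Nat)
  if PySem.Int.mod TempX 3 < 2 then
    (TD, PySem.Int.bor MaskX (PySem.Int.mod TempX 3), IndexX, PySem.Int.floordiv TempX 3)
  else
    (TD, MaskX, IndexX ++ [n - 1 - i], PySem.Int.floordiv TempX 3)

def genTD (X : Int) (n : Int) : List Int × Int × List Int :=
  let st := (PySem.List.pyRange 0 n 1).foldl (genTD_step n) ([], 0, [], X)
  (st.1, st.2.1, st.2.2.1)

-- ===== PORT B =====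
-- the while loop 'while p <= abs(X): p *= 3; k += 1' (p, k stay nonnegative, hence Nat);
-- the 'p = 0' guard only makes the recursion total and is never reached from p = 1
def genTD_powCount (a p k : Nat) : Nat :=
  if p = 0 then k
  else if p ≤ a then genTD_powCount a (p * 3) (k + 1)
  else k
termination_by a + 1 - p
decreasing_by omega

-- i ∈ range(min(k,n)) is nonnegative, so Python's 3**i is exactly (3:Int) ^ i.toNat;
-- '[c] * (n - len(TD))' with a possibly negative count is List.replicate (…).toNat
def genTD_alt (X : Int) (n : Int) : List Int × Int × List Int :=
  let k : Int := (genTD_powCount X.natAbs 1 0 : Nat)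
  let TD0 := (PySem.List.pyRange 0 (min k n) 1).map
    (fun i => PySem.Int.mod (PySem.Int.floordiv X ((3:Int) ^ i.toNat)) 3)
  let TD := TD0 ++ List.replicate (n - (TD0.length : Int)).toNat (if 0 ≤ X then 0 else 2)
  let IndexX := (PySem.List.enumerate TD 0).filterMap
    (fun p => if p.2 = 2 then some (n - 1 - p.1) else none)
  let MaskX := TD.foldl (fun m t => PySem.Int.bor (m <<< (1 : Nat)) (if t < 2 then t else 0)) 0
  (TD, MaskX, IndexX)

-- ===== PRECONDITION & SPEC =====
def Spec_genTD (X : Int) (n : Int) (out : List Int × Int × List Int) : Prop := out = genTD_alt X n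
instance (X : Int) (n : Int) (out : List Int × Int × List Int) : Decidable (Spec_genTD X n out) := by unfold Spec_genTD; infer_instance

-- ===== CLAIM (what is proved, stated in full; the proofs are below) =====
def Claim_equal_genTD : Prop := ∀ (X : Int) (n : Int), Dom_genTD X n → Spec_genTD X n (genTD X n)

-- ===== LEMMAS AND PROOFS =====

-- the k-th trit of X
def pvTrit (X : Int) (k : Nat) : Int := PySem.Int.mod (PySem.Int.floordiv X ((3:Int) ^ k)) 3

lemma pvTrit_bounds (X : Int) (k : Nat) : 0 ≤ pvTrit X k ∧ pvTrit X k < 3 := by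
  unfold pvTrit
  rw [PySem.Int.mod_eq_emod_of_pos (by norm_num : (0:Int) < 3)]
  exact ⟨Int.emod_nonneg _ (by norm_num), Int.emod_lt_of_pos _ (by norm_num)⟩

lemma pvFloordiv_succ (X : Int) (k : Nat) :
    PySem.Int.floordiv (PySem.Int.floordiv X ((3:Int) ^ k)) 3 = PySem.Int.floordiv X ((3:Int) ^ (k + 1)) := by
  rw [PySem.Int.floordiv_eq_ediv_of_pos (by positivity : (0:Int) < (3:Int) ^ k),
      PySem.Int.floordiv_eq_ediv_of_pos (by norm_num : (0:Int) < 3),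
      PySem.Int.floordiv_eq_ediv_of_pos (by positivity : (0:Int) < (3:Int) ^ (k+1)),
      Int.ediv_ediv_of_nonneg (by positivity), pow_succ]

-- loop invariant: after the first k iterations A's state is B's three passes on the first k trits,
-- together with X // 3^k as the running TempX
lemma genTD_invariant (X n : Int) (k : Nat) :
    (PySem.List.pyRange 0 (k : Int) 1).foldl (genTD_step n) ([], 0, [], X) =
      ((List.range k).map (pvTrit X),
       ((List.range k).map (pvTrit X)).foldl
         (fun m t => PySem.Int.bor (m <<< (1 : Nat)) (if t < 2 then t else 0)) 0,
       (PySem.List.enumerate ((List.range k).map (pvTrit X)) 0).filterMap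
         (fun p => if p.2 = 2 then some (n - 1 - p.1) else none),
       PySem.Int.floordiv X ((3:Int) ^ k)) := by
  induction k with
  | zero => simp [PySem.List.pyRange_one_eq_nil]
  | succ k ih =>
    rw [show ((k + 1 : Nat) : Int) = (k : Int) + 1 by push_cast; ring,
        PySem.List.pyRange_one_succ_right (by positivity : (0:Int) ≤ (k:Int)),
        List.foldl_append, ih, List.range_succ, List.map_append,
        PySem.List.enumerate_append]
    simp only [genTD_step, List.foldl_append, List.filterMap_append, List.map_cons, List.map_nil,
      PySem.List.enumerate_cons, PySem.List.enumerate_nil, List.foldl_cons, List.foldl_nil,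
      List.filterMap_cons, List.filterMap_nil]
    have hb := pvTrit_bounds X k
    have htrit : PySem.Int.mod (PySem.Int.floordiv X ((3:Int) ^ k)) 3 = pvTrit X k := rfl
    have hcast : ((k : Int)).toNat = k := by simp
    rw [htrit, pvFloordiv_succ]
    by_cases h : pvTrit X k < 2
    · have hne : ¬ pvTrit X k = 2 := by omega
      simp [h, hne]
    · have heq : pvTrit X k = 2 := by omega
      simp [heq, PySem.Int.bor_zero]

lemma pyRange_map_trit (X n : Int) (k : Nat) (hk : n = (k : Int)) :
    (PySem.List.pyRange 0 n 1).map
      (fun i => PySem.Int.mod (PySem.Int.floordiv X ((3:Int) ^ i.toNat)) 3) =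
      (List.range k).map (pvTrit X) := by
  subst hk
  rw [PySem.List.pyRange_one]
  simp [pvTrit]

-- the while loop's result k satisfies |X| < 3^(k-j) * p (so with p = 1, j = 0: |X| < 3^k)
lemma powCount_ge (a : Nat) : ∀ p j, j ≤ genTD_powCount a p j := by
  intro p j
  induction hgen : a + 1 - p using Nat.strong_induction_on generalizing p j with
  | _ m ih =>
    unfold genTD_powCount
    by_cases h0 : p = 0
    · simp [h0]
    rw [if_neg h0]
    by_cases h : p ≤ a
    · rw [if_pos h]
      have := ih (a + 1 - p * 3) (by omega) (p * 3) (j + 1) rfl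
      omega
    · rw [if_neg h]

lemma powCount_gt (a : Nat) : ∀ p j, 0 < p → a < 3 ^ (genTD_powCount a p j - j) * p := by
  intro p j hp
  induction hgen : a + 1 - p using Nat.strong_induction_on generalizing p j with
  | _ m ih =>
    unfold genTD_powCount
    rw [if_neg (by omega)]
    by_cases h : p ≤ a
    · rw [if_pos h]
      have h3 : a < 3 ^ (genTD_powCount a (p * 3) (j + 1) - (j + 1)) * (p * 3) :=
        ih (a + 1 - p * 3) (by omega) (p * 3) (j + 1) (by omega) rfl
      have hk : j + 1 ≤ genTD_powCount a (p * 3) (j + 1) := powCount_ge a (p * 3) (j + 1)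
      calc a < 3 ^ (genTD_powCount a (p * 3) (j + 1) - (j + 1)) * (p * 3) := h3
        _ = 3 ^ (genTD_powCount a (p * 3) (j + 1) - (j + 1)) * 3 * p := by ring
        _ = 3 ^ (genTD_powCount a (p * 3) (j + 1) - (j + 1) + 1) * p := by rw [pow_succ]
        _ ≤ 3 ^ (genTD_powCount a (p * 3) (j + 1) - j) * p := by
            have := Nat.pow_le_pow_right (show 1 ≤ 3 by omega)
              (show genTD_powCount a (p * 3) (j + 1) - (j + 1) + 1 ≤ genTD_powCount a (p * 3) (j + 1) - j by omega)
            exact Nat.mul_le_mul_right _ this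
    · rw [if_neg h]
      have : a < p := by omega
      simpa using this

-- once 3^i exceeds |X| the trit is constant: 0 for X ≥ 0, 2 for X < 0
lemma pvTrit_stable (X : Int) (i : Nat) (hi : X.natAbs < 3 ^ i) :
    pvTrit X i = if 0 ≤ X then 0 else 2 := by
  unfold pvTrit
  rw [PySem.Int.floordiv_eq_ediv_of_pos (by positivity : (0:Int) < (3:Int) ^ i),
      PySem.Int.mod_eq_emod_of_pos (by norm_num : (0:Int) < 3)]
  have h3 : (X.natAbs : Int) < (3:Int) ^ i := by exact_mod_cast hi
  by_cases hx : 0 ≤ X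
  · rw [if_pos hx, Int.ediv_eq_zero_of_lt hx (by omega)]
    decide
  · rw [if_neg hx]
    have hp : (0:Int) < (3:Int) ^ i := by positivity
    have h1 : X / (3:Int) ^ i = -1 := by
      have hX : X = (X + (3:Int) ^ i) + (3:Int) ^ i * (-1) := by ring
      rw [hX, Int.add_mul_ediv_left _ _ (by omega : ((3:Int) ^ i) ≠ 0),
          Int.ediv_eq_zero_of_lt (by omega) (by omega)]
      ring
    rw [h1]
    decide

-- B's trit table (significant part + constant padding) is the full closed-form trit list
lemma genTD_alt_TD (X n : Int) (N : Nat) (hn : n = (N : Int)) :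
    ((PySem.List.pyRange 0 (min ((genTD_powCount X.natAbs 1 0 : Nat) : Int) n) 1).map
        (fun i => PySem.Int.mod (PySem.Int.floordiv X ((3:Int) ^ i.toNat)) 3)) ++
      List.replicate
        (n - (((PySem.List.pyRange 0 (min ((genTD_powCount X.natAbs 1 0 : Nat) : Int) n) 1).map
          (fun i => PySem.Int.mod (PySem.Int.floordiv X ((3:Int) ^ i.toNat)) 3)).length : Int)).toNat
        (if 0 ≤ X then 0 else 2) =
      (List.range N).map (pvTrit X) := by
  subst hn
  have hmin : min ((genTD_powCount X.natAbs 1 0 : Nat) : Int) ((N : Nat) : Int) =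
      ((min (genTD_powCount X.natAbs 1 0) N : Nat) : Int) := by push_cast; omega
  rw [hmin, pyRange_map_trit X _ (min (genTD_powCount X.natAbs 1 0) N) rfl]
  set K := genTD_powCount X.natAbs 1 0 with hK
  have hlen : (((List.range (min K N)).map (pvTrit X)).length : Int) = ((min K N : Nat) : Int) := by
    simp
  rw [hlen]
  have hcount : (((N:Nat) : Int) - ((min K N : Nat) : Int)).toNat = N - min K N := by omega
  rw [hcount]
  have hXa : X.natAbs < 3 ^ K := by simpa using powCount_gt X.natAbs 1 0 (by omega)
  apply List.ext_getElem
  · simp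
  · intro i h1 h2
    by_cases hi : i < min K N
    · rw [List.getElem_append_left (by simpa using hi)]
      simp
    · rw [List.getElem_append_right (by simp at hi ⊢; omega)]
      rw [List.getElem_replicate, List.getElem_map, List.getElem_range]
      have hKi : K ≤ i := by simp at h2; omega
      have hXi : X.natAbs < 3 ^ i :=
        lt_of_lt_of_le hXa (Nat.pow_le_pow_right (by omega) hKi)
      exact (pvTrit_stable X i hXi).symm

-- ===== VERDICT (by name: the statement is the Claim_ definition above) =====
theorem genTD_spec : Claim_equal_genTD := by
  intro X n _
  show genTD X n = genTD_alt X n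
  unfold genTD genTD_alt
  dsimp only []
  by_cases hn : n ≤ 0
  · have hk : min ((genTD_powCount X.natAbs 1 0 : Nat) : Int) n ≤ 0 := by
      have := min_le_right ((genTD_powCount X.natAbs 1 0 : Nat) : Int) n; omega
    rw [PySem.List.pyRange_one_eq_nil hn, PySem.List.pyRange_one_eq_nil hk]
    simp [Int.toNat_eq_zero.mpr hn]
  · have hk : n = ((n.toNat : Nat) : Int) := by omega
    rw [genTD_alt_TD X n n.toNat hk, hk, genTD_invariant]
    simp [show max n 0 = n from by omega]
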